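-- pv_equiv track=rewrite | github.com/chimera-11/overrap | MeasureHowFresh/HowFresh.py | count_line_to_line
-- ===== SOURCE A (Python) =====
-- def count_line_to_line(x, y, line) :
--     i = 0
--     j = 0
--     while i < len(line)-1 :
--         if x == line[i] :
--             j = i + 1
--             while j < len(line) :
--                 if y == line[j] :
--                     return 1
--                 j = j + 1
--         elif y == line[i] :
--             j = i + 1
--             while j < len(line) :
--                 if y == line[j] :
--                     return 1
--                 j = j + 1
--         i = i + 1
--     return 0
-- ===== SOURCE B (Python) =====
-- def count_line_to_line(x, y, line):
--     # Single backward pass: once a y has been seen (strictly later in the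
--     # list), any earlier element equal to x or y means a hit.
--     seen_y = False
--     for v in reversed(line):
--         if seen_y and (v == x or v == y):
--             return 1
--         if v == y:
--             seen_y = True
--     return 0
-- ===== Notes on version B (the rewrite author's own statement) =====
-- stated objective: faster
-- what changed: Replaced the nested forward scans (for each x-or-y element, rescan the tail for y) with one backward pass keeping a 'y seen later' flag.
import Mathlib
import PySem

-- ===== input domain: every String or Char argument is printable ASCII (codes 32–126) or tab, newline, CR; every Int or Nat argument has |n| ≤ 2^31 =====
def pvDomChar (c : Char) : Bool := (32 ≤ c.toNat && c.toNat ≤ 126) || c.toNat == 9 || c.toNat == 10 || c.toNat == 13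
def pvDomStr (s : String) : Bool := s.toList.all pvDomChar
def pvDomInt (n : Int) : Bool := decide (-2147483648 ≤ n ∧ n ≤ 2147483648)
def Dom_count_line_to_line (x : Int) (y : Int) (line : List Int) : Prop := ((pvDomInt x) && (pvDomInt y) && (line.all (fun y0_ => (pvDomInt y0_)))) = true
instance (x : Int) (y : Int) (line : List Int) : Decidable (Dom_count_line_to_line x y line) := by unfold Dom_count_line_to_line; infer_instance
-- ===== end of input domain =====

-- B replaces A's nested forward scans with one backward pass keeping a
-- "y seen later" flag (objective: faster, O(n) vs O(n^2); return value only).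

-- ===== PORT A =====
-- inner while loop: scan the suffix after position i for y
def pvInner (y : Int) : List Int → Bool
  | [] => false
  | a :: t => if y == a then true else pvInner y t

-- outer while loop over i (the remaining suffix stands for line[i:]);
-- i < len(line)-1 means the remaining suffix has at least two elements
def pvOuter (x y : Int) : List Int → Int
  | [] => 0
  | [_] => 0
  | a :: t =>
    if x == a then
      if pvInner y t then 1 else pvOuter x y t
    else if y == a then
      if pvInner y t then 1 else pvOuter x y t
    else pvOuter x y t

def count_line_to_line (x : Int) (y : Int) (line : List Int) : Int :=
  pvOuter x y line

-- ===== PORT B =====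
-- the for-loop over reversed(line) with the seen_y flag
def pvBack (x y : Int) (seen : Bool) : List Int → Int
  | [] => 0
  | v :: t =>
    if seen && (v == x || v == y) then 1
    else pvBack x y (seen || (v == y)) t

def count_line_to_line_alt (x : Int) (y : Int) (line : List Int) : Int :=
  pvBack x y false line.reverse

-- ===== PRECONDITION & SPEC =====
def Spec_count_line_to_line (x : Int) (y : Int) (line : List Int) (out : Int) : Prop := out = count_line_to_line_alt x y line
instance (x : Int) (y : Int) (line : List Int) (out : Int) : Decidable (Spec_count_line_to_line x y line out) := by unfold Spec_count_line_to_line; infer_instance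

-- ===== CLAIM (what is proved, stated in full; the proofs are below) =====
def Claim_equal_count_line_to_line : Prop := ∀ (x : Int) (y : Int) (line : List Int), Dom_count_line_to_line x y line → Spec_count_line_to_line x y line (count_line_to_line x y line)

-- ===== LEMMAS AND PROOFS =====

-- boolean version of A's answer
def pvF (x y : Int) : List Int → Bool
  | [] => false
  | a :: t => ((a == x || a == y) && t.contains y) || pvF x y t

theorem pvInner_eq_contains (y : Int) (l : List Int) : pvInner y l = l.contains y := by
  induction l with
  | nil => rfl
  | cons a t ih =>
    simp only [pvInner, List.contains_cons, ih]
    by_cases h : y = a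
    · simp [h]
    · have h' : ¬ a = y := fun e => h e.symm
      simp [h]

theorem pvOuter_eq_pvF (x y : Int) (l : List Int) :
    pvOuter x y l = if pvF x y l then 1 else 0 := by
  induction l with
  | nil => rfl
  | cons a t ih =>
    cases t with
    | nil =>
      simp [pvOuter, pvF]
    | cons b u =>
      simp only [pvOuter, pvInner_eq_contains, ih, pvF]
      by_cases hx : x = a
      · simp only [hx]
        simp
        split_ifs <;> tauto
      · by_cases hy : y = a
        · simp only [hy]
          simp [hx]
          split_ifs <;> tauto
        · have hax : (a == x) = false := by simp; exact fun e => hx e.symm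
          have hay : (a == y) = false := by simp; exact fun e => hy e.symm
          simp [hx, hy, hax, hay]

theorem pvBack_append (x y : Int) (seen : Bool) (m : List Int) (a : Int) :
    pvBack x y seen (m ++ [a]) =
      if pvBack x y seen m == 1 || ((seen || m.contains y) && (a == x || a == y)) then 1 else 0 := by
  induction m generalizing seen with
  | nil => simp only [List.nil_append, pvBack, List.contains_nil]
           by_cases h : (seen && (a == x || a == y)) = true <;> simp_all
  | cons v t ih =>
    simp only [List.cons_append, pvBack, List.contains_cons]
    by_cases h : (seen && (v == x || v == y)) = true
    · simp [h]
    · simp only [h]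
      rw [ih]
      by_cases hv : v = y
      · subst hv
        simp
      · have hv' : ¬ y = v := fun e => hv e.symm
        simp [hv, hv']

theorem pvBack_reverse_eq_pvF (x y : Int) (l : List Int) :
    pvBack x y false l.reverse = if pvF x y l then 1 else 0 := by
  induction l with
  | nil => rfl
  | cons a t ih =>
    rw [List.reverse_cons, pvBack_append, ih]
    simp only [pvF, Bool.false_or]
    have hc : t.reverse.contains y = t.contains y := by
      simp
    rw [hc]
    by_cases h1 : pvF x y t = true
    · simp [h1]
    · by_cases h2 : t.contains y = true <;>
        by_cases h3 : (a == x || a == y) = true <;>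
          simp [h1, h3, Bool.and_comm]

-- ===== VERDICT (by name: the statement is the Claim_ definition above) =====
theorem count_line_to_line_spec : Claim_equal_count_line_to_line := by
  intro x y line _
  unfold Spec_count_line_to_line count_line_to_line count_line_to_line_alt
  rw [pvOuter_eq_pvF, pvBack_reverse_eq_pvF]
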